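-- pv_equiv track=rewrite | github.com/RvL13Capital/sound-of-silence | dach_momentum/dach_momentum/data.py | _filename_to_ticker
-- ===== SOURCE A (Python) =====
-- def _filename_to_ticker(stem: str) -> str:
--     """Best-effort reverse of ``_ticker_to_filename``."""
--     # Reconstruct common yfinance suffixes
--     for suffix in (
--         ".DE", ".VI", ".SW", ".PA", ".AS", ".BR", ".MI", ".MC",
--         ".ST", ".CO", ".HE", ".OL", ".LS", ".WA", ".L", ".AT",
--     ):
--         tag = suffix.replace(".", "_")          # e.g. "_DE"
--         if stem.endswith(tag):
--             return stem[: -len(tag)] + suffix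
--     return stem
-- ===== SOURCE B (Python) =====
-- CODES = {"DE", "VI", "SW", "PA", "AS", "BR", "MI", "MC",
--          "ST", "CO", "HE", "OL", "LS", "WA", "L", "AT"}
--
--
-- def _filename_to_ticker(stem: str) -> str:
--     """Best-effort reverse of ``_ticker_to_filename``."""
--     head, sep, tail = stem.rpartition("_")
--     if sep and tail in CODES:
--         return head + "." + tail
--     return stem
-- ===== Notes on version B (the rewrite author's own statement) =====
-- stated objective: simpler
-- what changed: Replaces the 16-iteration endswith/slice scan with a single rpartition at the last underscore plus one set-membership test on the trailing segment.
import Mathlib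
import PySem

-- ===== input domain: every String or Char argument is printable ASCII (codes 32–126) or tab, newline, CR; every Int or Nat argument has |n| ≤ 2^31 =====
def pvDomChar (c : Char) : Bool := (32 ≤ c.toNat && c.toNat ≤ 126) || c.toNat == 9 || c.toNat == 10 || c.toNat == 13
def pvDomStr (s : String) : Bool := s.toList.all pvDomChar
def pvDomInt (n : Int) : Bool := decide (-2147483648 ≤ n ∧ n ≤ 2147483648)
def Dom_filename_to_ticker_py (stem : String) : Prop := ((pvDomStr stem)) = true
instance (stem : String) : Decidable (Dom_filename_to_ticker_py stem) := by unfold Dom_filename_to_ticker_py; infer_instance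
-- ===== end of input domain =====

-- B replaces A's 16-iteration endswith/slice scan by one rpartition at the last '_'
-- plus a single set-membership test on the trailing segment (objective: simpler).

-- ===== PORT A =====
-- the tuple of suffixes A iterates over, at code-point level
def pvSuffixes : List (List Char) :=
  [['.','D','E'], ['.','V','I'], ['.','S','W'], ['.','P','A'], ['.','A','S'], ['.','B','R'],
   ['.','M','I'], ['.','M','C'], ['.','S','T'], ['.','C','O'], ['.','H','E'], ['.','O','L'],
   ['.','L','S'], ['.','W','A'], ['.','L'], ['.','A','T']]

-- the for-loop with early return: first matching suffix wins, else fall through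
def pvLoopA : List (List Char) → List Char → List Char
  | [], l => l
  | sfx :: rest, l =>
      let tag := PySem.Chars.replace sfx ['.'] ['_']                 -- suffix.replace(".", "_")
      if PySem.Chars.endswith l tag then                             -- stem.endswith(tag)
        PySem.Chars.slice l none (some (-(tag.length : Int))) ++ sfx -- stem[: -len(tag)] + suffix
      else pvLoopA rest l

def filename_to_ticker_py (stem : String) : String :=
  String.ofList (pvLoopA pvSuffixes stem.toList)

-- ===== PORT B =====
-- CODES, at code-point level
def pvCodes : List (List Char) :=
  [['D','E'], ['V','I'], ['S','W'], ['P','A'], ['A','S'], ['B','R'], ['M','I'], ['M','C'],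
   ['S','T'], ['C','O'], ['H','E'], ['O','L'], ['L','S'], ['W','A'], ['L'], ['A','T']]

-- `head, sep, tail = stem.rpartition('_')` ported by hand over code points (exact for a
-- one-character separator): scan the reversed list up to the first '_'.
def filename_to_ticker_py_alt (stem : String) : String :=
  let r := stem.toList.reverse
  let tR := r.takeWhile (fun c => c != '_')
  if tR.length = r.length then stem                                  -- no '_' : sep == '' → stem
  else if tR.reverse ∈ pvCodes then                                  -- sep and tail in CODES
    String.ofList ((r.drop (tR.length + 1)).reverse ++ '.' :: tR.reverse)  -- head + "." + tail
  else stem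

-- ===== PRECONDITION & SPEC =====
def Spec_filename_to_ticker_py (stem : String) (out : String) : Prop := out = filename_to_ticker_py_alt stem
instance (stem : String) (out : String) : Decidable (Spec_filename_to_ticker_py stem out) := by unfold Spec_filename_to_ticker_py; infer_instance

-- ===== CLAIM (what is proved, stated in full; the proofs are below) =====
def Claim_equal_filename_to_ticker_py : Prop := ∀ (stem : String), Dom_filename_to_ticker_py stem → Spec_filename_to_ticker_py stem (filename_to_ticker_py stem)

-- ===== LEMMAS AND PROOFS =====

-- `c' ++ ['_']` is a prefix of r  ↔  the '_'-free part of r is exactly c' and a '_' follows.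
theorem pv_pref_char (c' : List Char) (hc : ∀ x ∈ c', x ≠ '_') (r : List Char) :
    (c' ++ ['_'] <+: r) ↔
      (r.takeWhile (fun x => x != '_') = c' ∧ r.dropWhile (fun x => x != '_') ≠ []) := by
  induction c' generalizing r with
  | nil =>
    cases r with
    | nil => simp
    | cons x rs =>
      rw [List.nil_append, List.cons_prefix_cons, List.takeWhile_cons, List.dropWhile_cons]
      by_cases hx : x = '_'
      · subst hx; simp
      · have hxb : (x != '_') = true := by simpa using hx
        simp [hxb, Ne.symm hx]
  | cons a c' ih =>
    have ha : a ≠ '_' := hc a (by simp)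
    cases r with
    | nil => simp
    | cons x rs =>
      rw [List.cons_append, List.cons_prefix_cons, List.takeWhile_cons, List.dropWhile_cons]
      by_cases hx : x = '_'
      · subst hx
        simp [ha]
      · have hxb : (x != '_') = true := by simpa using hx
        simp only [hxb, if_true, ih (fun y hy => hc y (by simp [hy])), List.cons_eq_cons]
        constructor
        · rintro ⟨rfl, h2, h3⟩; exact ⟨⟨rfl, h2⟩, h3⟩
        · rintro ⟨⟨rfl, h2⟩, h3⟩; exact ⟨rfl, h2, h3⟩

theorem pv_endswith_char (l c : List Char) (hc : ∀ x ∈ c, x ≠ '_') :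
    PySem.Chars.endswith l ('_' :: c) = true ↔
      (l.reverse.takeWhile (fun x => x != '_') = c.reverse ∧
       l.reverse.dropWhile (fun x => x != '_') ≠ []) := by
  rw [PySem.Chars.endswith_iff]
  have : ('_' :: c <:+ l) ↔ (c.reverse ++ ['_'] <+: l.reverse) := by
    rw [← List.reverse_prefix]; simp
  rw [this, pv_pref_char _ (by simpa using fun x hx => hc x hx)]


-- the head of a non-empty dropWhile fails the predicate: here it is '_'
theorem pv_dropWhile_head (r : List Char) (h : r.dropWhile (fun x => x != '_') ≠ []) :
    ∃ d', r.dropWhile (fun x => x != '_') = '_' :: d' := by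
  induction r with
  | nil => simp at h
  | cons x rs ih =>
    rw [List.dropWhile_cons] at h ⊢
    by_cases hx : (x != '_') = true
    · simp only [hx, if_true] at h ⊢; exact ih h
    · have : x = '_' := by simpa using hx
      subst this
      exact ⟨rs, by simp⟩

-- stem[:-(k+1)] when the reversed stem is t ++ '_' :: d'
theorem pv_take_eq (t d' l : List Char) (hl : l.reverse = t ++ '_' :: d') :
    l.take (l.length - (t.length + 1)) = d'.reverse := by
  have hl' : l = d'.reverse ++ '_' :: t.reverse := by
    have := congrArg List.reverse hl
    simpa using this
  rw [hl']
  have hn : (d'.reverse ++ '_' :: t.reverse).length - (t.length + 1) = d'.length := by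
    simp [List.length_append]
  rw [hn, List.take_append]
  simp

-- every suffix A iterates over is '.' followed by a nonempty '_'-free code,
-- and replace('.', '_') turns it into '_' followed by that code
theorem pv_drop (t d' : List Char) : (t ++ '_' :: d').drop (t.length + 1) = d' := by
  simp [List.drop_append]

set_option maxRecDepth 10000 in
theorem pv_hs_bool : ∀ s ∈ pvSuffixes, s = '.' :: s.tail ∧
    PySem.Chars.replace s ['.'] ['_'] = '_' :: s.tail ∧
    s.tail.all (fun x => x != '_') = true := by decide

theorem pv_hs : ∀ s ∈ pvSuffixes, ∃ c, s = '.' :: c ∧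
    PySem.Chars.replace s ['.'] ['_'] = '_' :: c ∧ ∀ x ∈ c, x ≠ '_' := by
  intro s hs
  obtain ⟨h1, h2, h3⟩ := pv_hs_bool s hs
  exact ⟨s.tail, h1, h2, by simpa using h3⟩

-- A's loop, characterised: it fires iff a '_' exists and the segment after the
-- last '_' (read off the reversed list) is one of the codes, and then rebuilds
-- head ++ '.' ++ code — the first match is the only possible match because the
-- matching suffix is determined by that segment.
theorem pv_loopA_eq (sfxs : List (List Char)) (l : List Char)
    (hs : ∀ s ∈ sfxs, ∃ c, s = '.' :: c ∧
      PySem.Chars.replace s ['.'] ['_'] = '_' :: c ∧ ∀ x ∈ c, x ≠ '_') :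
    pvLoopA sfxs l =
      if (l.reverse.dropWhile (fun x => x != '_') ≠ [] ∧
          ('.' :: (l.reverse.takeWhile (fun x => x != '_')).reverse) ∈ sfxs)
      then (l.reverse.dropWhile (fun x => x != '_')).tail.reverse
             ++ '.' :: (l.reverse.takeWhile (fun x => x != '_')).reverse
      else l := by
  induction sfxs with
  | nil => simp [pvLoopA]
  | cons s rest ih =>
    obtain ⟨c, hc1, hrepl, hcfree⟩ := hs s (by simp)
    subst hc1
    simp only [pvLoopA, hrepl]
    by_cases hend : PySem.Chars.endswith l ('_' :: c) = true
    · rw [if_pos hend]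
      obtain ⟨ht, hd⟩ := (pv_endswith_char l c hcfree).mp hend
      obtain ⟨d', hd'⟩ := pv_dropWhile_head _ hd
      have hmem : ('.' :: (l.reverse.takeWhile (fun x => x != '_')).reverse)
          ∈ ('.' :: c) :: rest := by
        rw [ht]; simp
      rw [if_pos ⟨hd, hmem⟩]
      have hr : l.reverse = c.reverse ++ '_' :: d' := by
        rw [← ht, ← hd', List.takeWhile_append_dropWhile]
      congr 1
      · rw [PySem.Chars.slice_eq_listSlice]
        have hk : (('_' :: c).length : Int) = ((c.length + 1 : Nat) : Int) := by simp
        rw [hk, PySem.List.slice_to_neg_natCast _ _ (by omega), hd']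
        simpa using pv_take_eq c.reverse d' l hr
      · rw [ht]; simp
    · rw [if_neg hend, ih (fun s hs' => hs s (by simp [hs']))]
      by_cases hd : l.reverse.dropWhile (fun x => x != '_') = []
      · simp [hd]
      · have hne : ('.' :: (l.reverse.takeWhile (fun x => x != '_')).reverse) ≠ '.' :: c := by
          intro h
          apply hend
          apply (pv_endswith_char l c hcfree).mpr
          have hc : (l.reverse.takeWhile (fun x => x != '_')).reverse = c := by
            simpa using h
          exact ⟨by rw [← hc]; simp, hd⟩
        simp only [List.mem_cons, hne, false_or]

-- ===== VERDICT (by name: the statement is the Claim_ definition above) =====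
theorem filename_to_ticker_py_spec : Claim_equal_filename_to_ticker_py := by
  intro stem _
  unfold Spec_filename_to_ticker_py filename_to_ticker_py filename_to_ticker_py_alt
  rw [pv_loopA_eq pvSuffixes stem.toList pv_hs]
  have hr : stem.toList.reverse
      = stem.toList.reverse.takeWhile (fun x => x != '_')
        ++ stem.toList.reverse.dropWhile (fun x => x != '_') :=
    (List.takeWhile_append_dropWhile).symm
  have h1 := congrArg List.length hr
  rw [List.length_append] at h1
  by_cases hd : stem.toList.reverse.dropWhile (fun x => x != '_') = []
  · rw [hd] at h1
    rw [if_neg (by simp [hd]), if_pos (by simp only [List.length_nil] at h1; omega)]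
    simp
  · obtain ⟨d', hd'⟩ := pv_dropWhile_head _ hd
    rw [hd'] at h1
    have hlen : ¬ (stem.toList.reverse.takeWhile (fun x => x != '_')).length
        = stem.toList.reverse.length := by simp only [List.length_cons] at h1; omega
    have hmem : ('.' :: (stem.toList.reverse.takeWhile (fun x => x != '_')).reverse ∈ pvSuffixes)
        ↔ ((stem.toList.reverse.takeWhile (fun x => x != '_')).reverse ∈ pvCodes) := by
      simp [pvSuffixes, pvCodes]
    by_cases hm : (stem.toList.reverse.takeWhile (fun x => x != '_')).reverse ∈ pvCodes
    · rw [if_pos ⟨hd, hmem.mpr hm⟩, if_neg hlen, if_pos hm]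
      have hdrop := pv_drop (stem.toList.reverse.takeWhile (fun x => x != '_')) d'
      rw [← hd', ← hr] at hdrop
      rw [hdrop, hd', List.tail_cons]
    · rw [if_neg (by rintro ⟨_, h⟩; exact hm (hmem.mp h)), if_neg hlen, if_neg hm]
      simp
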